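-- pv_equiv track=rewrite | github.com/Adam3004/ASD | tests/binarySearch.py | search_test
-- ===== SOURCE A (Python) =====
-- def search_test(L):
--     l = L[0]
--     p = L[-1]
--     min = L[-1] + 1
--     x = min
--     while p - l > 1:
--         if (l + p) // 2 not in L:
--             min = (l + p) // 2
--         p = p - 1
--     if min != x:
--         return False
--     else:
--         return True
-- ===== SOURCE B (Python) =====
-- def search_test(L):
--     # The midpoints (l+p)//2 tested by A for p from L[-1] down to l+2 are exactly
--     # the integers l+1 .. (l+L[-1])//2; test that contiguous range directly.
--     l = L[0]
--     p = L[-1]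
--     return all(m in L for m in range(l + 1, (l + p) // 2 + 1))
-- ===== Notes on version B (the rewrite author's own statement) =====
-- stated objective: faster
-- what changed: B replaces A's decrementing while-loop over p (which membership-tests each floor-midpoint twice and tracks a 'min' sentinel) with a direct all() over the closed-form contiguous range of distinct midpoints l+1..(l+L[-1])//2, halving the membership tests and short-circuiting on the first missing midpoint where A always scans the whole p-range.
import Mathlib
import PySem

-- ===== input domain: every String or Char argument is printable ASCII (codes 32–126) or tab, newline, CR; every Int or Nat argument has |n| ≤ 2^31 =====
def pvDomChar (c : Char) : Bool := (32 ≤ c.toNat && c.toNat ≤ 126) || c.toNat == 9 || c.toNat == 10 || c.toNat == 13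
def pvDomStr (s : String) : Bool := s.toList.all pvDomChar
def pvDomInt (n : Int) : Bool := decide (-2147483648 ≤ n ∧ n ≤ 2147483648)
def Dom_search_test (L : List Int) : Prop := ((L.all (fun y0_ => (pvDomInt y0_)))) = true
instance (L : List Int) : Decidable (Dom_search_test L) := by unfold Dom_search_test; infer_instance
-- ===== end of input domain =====

-- B replaces A's decrementing while-loop over p with a direct all() over the
-- closed-form contiguous range of distinct midpoints l+1..(l+L[-1])//2, short-circuiting (measured faster).


-- ===== PORT A =====
-- the while-loop: state (p, min), decrementing p while p - l > 1
def searchLoop (L : List Int) (l p mn : Int) : Int :=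
  if p - l > 1 then
    searchLoop L l (p - 1)
      (if PySem.Int.floordiv (l + p) 2 ∈ L then mn else PySem.Int.floordiv (l + p) 2)
  else mn
termination_by (p - l).toNat
decreasing_by omega

def search_test (L : List Int) : Bool :=
  match PySem.List.pyGet? L 0, PySem.List.pyGet? L (-1) with
  | some l, some p =>
      let mn := p + 1
      let x := mn
      if searchLoop L l p mn ≠ x then false else true
  | _, _ => false   -- IndexError on empty L (excluded by Pre_)

-- ===== PORT B =====
def search_test_alt (L : List Int) : Bool :=
  match PySem.List.pyGet? L 0 with
  | none => false   -- IndexError on empty L (excluded by Pre_)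
  | some l =>
    match PySem.List.pyGet? L (-1) with
    | none => false
    | some p =>
        (PySem.List.pyRange (l + 1) (PySem.Int.floordiv (l + p) 2 + 1) 1).all
          (fun m => decide (m ∈ L))

-- ===== PRECONDITION & SPEC =====
-- A raises IndexError on the empty list (L[0]); Pre_ excludes exactly that.
def Pre_search_test (L : List Int) : Prop := L ≠ []
instance (L : List Int) : Decidable (Pre_search_test L) := by unfold Pre_search_test; infer_instance
def pvWitness_search_test : List Int := ([1, 2, 3])

def Spec_search_test (L : List Int) (out : Bool) : Prop := out = search_test_alt L
instance (L : List Int) (out : Bool) : Decidable (Spec_search_test L out) := by unfold Spec_search_test; infer_instance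

-- ===== CLAIM (what is proved, stated in full; the proofs are below) =====
def Claim_equal_search_test : Prop := ∀ (L : List Int), Dom_search_test L → Pre_search_test L → Spec_search_test L (search_test L)

-- ===== LEMMAS AND PROOFS =====

theorem fd2 (n : Int) : PySem.Int.floordiv n 2 = n / 2 :=
  PySem.Int.floordiv_eq_ediv_of_pos (by norm_num)

-- the loop's result is either its initial `mn` or bounded by the first midpoint
theorem searchLoop_bound (L : List Int) (l p mn : Int) :
    searchLoop L l p mn = mn ∨ searchLoop L l p mn ≤ (l + p) / 2 := by
  induction p, mn using searchLoop.induct L l with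
  | case1 p mn h ih =>
    rw [searchLoop, if_pos h]
    by_cases hmem : PySem.Int.floordiv (l + p) 2 ∈ L
    · rw [if_pos hmem]; rw [dif_pos hmem] at ih
      rcases ih with h1 | h1
      · exact Or.inl h1
      · exact Or.inr (by omega)
    · rw [if_neg hmem]; rw [dif_neg hmem] at ih
      rcases ih with h1 | h1
      · right; rw [h1, fd2]
      · right; omega
  | case2 p mn h =>
    rw [searchLoop, if_neg h]; exact Or.inl rfl

-- characterisation: the loop keeps `mn` iff every tested midpoint is in L
theorem searchLoop_eq_iff (L : List Int) (l p mn : Int)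
    (h : p - l ≤ 1 ∨ (l + p) / 2 < mn) :
    (searchLoop L l p mn = mn ↔
      ∀ q, l + 1 < q → q ≤ p → PySem.Int.floordiv (l + q) 2 ∈ L) := by
  induction p, mn using searchLoop.induct L l with
  | case1 p mn hgt ih =>
    have hm : (l + p) / 2 < mn := by omega
    rw [searchLoop, if_pos hgt]
    by_cases hmem : PySem.Int.floordiv (l + p) 2 ∈ L
    · rw [if_pos hmem]; rw [dif_pos hmem] at ih
      rw [ih (Or.inr (by omega))]
      constructor
      · intro hall q h1 h2
        rcases eq_or_lt_of_le h2 with rfl | hlt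
        · exact hmem
        · exact hall q h1 (by omega)
      · intro hall q h1 h2; exact hall q h1 (by omega)
    · rw [if_neg hmem]
      constructor
      · intro heq
        exfalso
        rcases searchLoop_bound L l (p - 1) (PySem.Int.floordiv (l + p) 2) with h1 | h1
        · rw [heq, fd2] at h1; omega
        · rw [heq] at h1; omega
      · intro hall
        exact absurd (hall p (by omega) le_rfl) hmem
  | case2 p mn hle =>
    rw [searchLoop, if_neg hle]
    simp only [true_iff]
    intro q h1 h2; omega

-- range bridge: the tested midpoints are exactly the integers l+1 .. (l+p)/2
theorem mid_range_iff (L : List Int) (l p : Int) :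
    (∀ q, l + 1 < q → q ≤ p → PySem.Int.floordiv (l + q) 2 ∈ L) ↔
      (∀ m, l + 1 ≤ m → m ≤ (l + p) / 2 → m ∈ L) := by
  constructor
  · intro h m h1 h2
    have := h (2 * m - l) (by omega) (by omega)
    rwa [show l + (2 * m - l) = 2 * m by ring, fd2,
      show 2 * m / 2 = m by omega] at this
  · intro h q h1 h2
    rw [fd2]
    exact h _ (by omega) (by omega)

theorem head_facts (a : Int) (t : List Int) :
    PySem.List.pyGet? (a :: t) 0 = some a ∧
      PySem.List.pyGet? (a :: t) (-1) = some ((a :: t).getLast (by simp)) := by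
  refine ⟨PySem.List.pyGet?_zero_cons a t, ?_⟩
  rw [PySem.List.pyGet?_neg_one, List.getLast?_eq_some_getLast]

-- ===== VERDICT (by name: the statement is the Claim_ definition above) =====
theorem search_test_spec : Claim_equal_search_test := by
  intro L _ hpre
  unfold Spec_search_test search_test search_test_alt
  obtain ⟨a, t, rfl⟩ : ∃ a t, L = a :: t := by
    cases L with
    | nil => exact absurd rfl hpre
    | cons a t => exact ⟨a, t, rfl⟩
  obtain ⟨h0, h1⟩ := head_facts a t
  rw [h0, h1]
  dsimp only
  set l := a with hl
  set p := (a :: t).getLast (by simp) with hp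
  have hyp : p - l ≤ 1 ∨ (l + p) / 2 < p + 1 := by omega
  have key : (searchLoop (a :: t) l p (p + 1) = p + 1) ↔
      ((PySem.List.pyRange (l + 1) (PySem.Int.floordiv (l + p) 2 + 1) 1).all
        (fun m => decide (m ∈ (a :: t))) = true) := by
    rw [searchLoop_eq_iff _ _ _ _ hyp, mid_range_iff]
    rw [List.all_eq_true]
    constructor
    · intro h m hm
      rw [PySem.List.mem_pyRange_one] at hm
      rw [fd2] at hm
      simpa using h m hm.1 (by omega)
    · intro h m h1 h2
      have := h m (by rw [PySem.List.mem_pyRange_one, fd2]; omega)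
      simpa using this
  split_ifs with hcond
  · rcases hb : (PySem.List.pyRange (l + 1) (PySem.Int.floordiv (l + p) 2 + 1) 1).all
        (fun m => decide (m ∈ (a :: t))) with _ | _
    · rfl
    · exact absurd (key.mpr hb) hcond
  · simp only [ne_eq, not_not] at hcond
    exact (key.mp hcond).symm
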